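-- pv_equiv track=rewrite | github.com/chrishargreaves/solve-it | reporting_scripts/find_next_free_ids.py | find_next_available
-- ===== SOURCE A (Python) =====
-- from typing import Set, Dict, List, Tuple
--
-- def find_next_available(used_ids: Set[int], reserved_ids: Dict[int, List[Tuple[int, str, str]]], count: int = 5) -> List[int]:
--     """Find the next available IDs after the highest used ID"""
--     all_used = used_ids | set(reserved_ids.keys())
--     if not all_used:
--         return list(range(1001, 1001 + count))
--
--     max_id = max(all_used)
--     next_ids = []
--     current = max_id + 1
--
--     while len(next_ids) < count:
--         if current not in all_used:
--             next_ids.append(current)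
--         current += 1
--
--     return next_ids
-- ===== SOURCE B (Python) =====
-- def find_next_available(used_ids, reserved_ids, count=5):
--     """Closed form: the next `count` IDs after the maximum are all free."""
--     all_used = set(used_ids) | set(reserved_ids.keys())
--     if not all_used:
--         return list(range(1001, 1001 + count))
--     max_id = max(all_used)
--     return list(range(max_id + 1, max_id + 1 + count))
-- ===== Notes on version B (the rewrite author's own statement) =====
-- stated objective: simpler
-- what changed: Replaces the candidate-by-candidate while loop with its membership test by a closed-form range: every ID above max(all_used) is free, so the answer is list(range(max_id+1, max_id+1+count)).
import Mathlib
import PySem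

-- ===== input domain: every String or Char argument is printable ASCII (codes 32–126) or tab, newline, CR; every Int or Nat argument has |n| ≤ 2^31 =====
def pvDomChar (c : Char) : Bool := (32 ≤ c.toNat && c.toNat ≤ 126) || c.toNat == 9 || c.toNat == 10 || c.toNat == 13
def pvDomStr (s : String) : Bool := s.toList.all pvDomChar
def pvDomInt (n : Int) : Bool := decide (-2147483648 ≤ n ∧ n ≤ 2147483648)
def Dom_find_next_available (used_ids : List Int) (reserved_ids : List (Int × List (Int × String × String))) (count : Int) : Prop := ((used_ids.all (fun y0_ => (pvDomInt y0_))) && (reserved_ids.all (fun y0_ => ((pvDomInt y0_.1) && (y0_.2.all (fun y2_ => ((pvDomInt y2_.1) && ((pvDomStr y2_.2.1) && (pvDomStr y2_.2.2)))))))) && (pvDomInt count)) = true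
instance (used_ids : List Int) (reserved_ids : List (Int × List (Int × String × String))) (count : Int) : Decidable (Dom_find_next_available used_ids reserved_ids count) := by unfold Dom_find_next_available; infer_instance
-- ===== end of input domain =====

-- B replaces A's candidate-by-candidate while loop (with its membership test) by the
-- closed-form range starting just above max(all_used); objective: simpler.

-- ===== PORT A =====
-- the while loop: condition `len(next_ids) < count`, membership test, `current += 1`.
-- Fuel guard only (totality): every iteration starts with current > max(all_used), so the
-- membership test fails and each iteration appends; the loop runs exactly count iterations,
-- hence fuel (count - acc.length).toNat is exact.
def fnaLoop (all_used : PySem.Set Int) (count : Int) : Nat → Int → List Int → List Int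
  | 0, _, acc => acc
  | fuel + 1, current, acc =>
    if (acc.length : Int) < count then
      let acc' := if PySem.Set.contains all_used current then acc else acc ++ [current]
      fnaLoop all_used count fuel (current + 1) acc'
    else acc

def find_next_available (used_ids : List Int) (reserved_ids : List (Int × List (Int × String × String))) (count : Int) : List Int :=
  let all_used : PySem.Set Int := PySem.Set.union (PySem.Set.ofList used_ids) (reserved_ids.map Prod.fst)
  if all_used.isEmpty then PySem.List.pyRange 1001 (1001 + count) 1
  else
    match PySem.List.max? all_used (fun x => x) with
    | none => []  -- unreachable: all_used nonempty
    | some max_id => fnaLoop all_used count (count - 0).toNat (max_id + 1) []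

-- ===== PORT B =====
def find_next_available_alt (used_ids : List Int) (reserved_ids : List (Int × List (Int × String × String))) (count : Int) : List Int :=
  let all_used : PySem.Set Int := PySem.Set.union (PySem.Set.ofList used_ids) (reserved_ids.map Prod.fst)
  if all_used.isEmpty then PySem.List.pyRange 1001 (1001 + count) 1
  else
    match PySem.List.max? all_used (fun x => x) with
    | none => []  -- unreachable: all_used nonempty
    | some max_id => PySem.List.pyRange (max_id + 1) (max_id + 1 + count) 1

-- ===== PRECONDITION & SPEC =====
def Spec_find_next_available (used_ids : List Int) (reserved_ids : List (Int × List (Int × String × String))) (count : Int) (out : List Int) : Prop := out = find_next_available_alt used_ids reserved_ids count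
instance (used_ids : List Int) (reserved_ids : List (Int × List (Int × String × String))) (count : Int) (out : List Int) : Decidable (Spec_find_next_available used_ids reserved_ids count out) := by unfold Spec_find_next_available; infer_instance

-- ===== CLAIM (what is proved, stated in full; the proofs are below) =====
def Claim_equal_find_next_available : Prop := ∀ (used_ids : List Int) (reserved_ids : List (Int × List (Int × String × String))) (count : Int), Dom_find_next_available used_ids reserved_ids count → Spec_find_next_available used_ids reserved_ids count (find_next_available used_ids reserved_ids count)

-- ===== LEMMAS AND PROOFS =====

-- When every element of the set is below `current`, the loop just appends the next
-- `fuel` consecutive integers.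
theorem fnaLoop_eq_pyRange (S : PySem.Set Int) (count : Int) :
    ∀ (fuel : Nat) (current : Int) (acc : List Int),
      (∀ x ∈ S, x < current) → fuel = (count - acc.length).toNat →
      fnaLoop S count fuel current acc = acc ++ PySem.List.pyRange current (current + fuel) 1 := by
  intro fuel
  induction fuel with
  | zero =>
    intro current acc _ _
    rw [PySem.List.pyRange_one_eq_nil (by omega : current + ((0:Nat) : Int) ≤ current)]
    simp [fnaLoop]
  | succ f ih =>
    intro current acc hlt hfuel
    have hcnt : (acc.length : Int) < count := by omega
    have hmem : current ∉ S := fun h => absurd (hlt _ h) (by omega)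
    have hnot : PySem.Set.contains S current = false := by
      rw [← Bool.not_eq_true, PySem.Set.contains_iff]; exact hmem
    rw [fnaLoop, if_pos hcnt]
    simp only [hnot, if_neg Bool.false_ne_true]
    rw [ih (current + 1) (acc ++ [current])
        (fun x hx => by have := hlt x hx; omega)
        (by simp; omega)]
    rw [PySem.List.pyRange_one_cons (by omega : current < current + (↑(f + 1) : Int))]
    simp
    congr 1
    omega

theorem find_next_available_spec : Claim_equal_find_next_available := by
  intro used_ids reserved_ids count _
  unfold Spec_find_next_available find_next_available find_next_available_alt
  set S : PySem.Set Int := PySem.Set.union (PySem.Set.ofList used_ids) (reserved_ids.map Prod.fst) with hS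
  by_cases he : S.isEmpty
  · simp [he]
  · rw [if_neg (by simp [he]), if_neg (by simp [he])]
    cases hm : PySem.List.max? S (fun x => x) with
    | none => rfl
    | some max_id =>
      have hmax : ∀ x ∈ S, x < max_id + 1 := by
        intro x hx
        have := PySem.List.max?_isMax hm x hx
        omega
      dsimp only
      rw [fnaLoop_eq_pyRange S count ((count - 0).toNat) (max_id + 1) [] hmax (by simp)]
      simp only [List.nil_append]
      by_cases hc : 0 ≤ count
      · congr 1
        omega
      · rw [PySem.List.pyRange_one_eq_nil (by omega),
            PySem.List.pyRange_one_eq_nil (by omega : max_id + 1 + count ≤ max_id + 1)]
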